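-- pv_equiv track=rewrite | github.com/tailogs/MyLisp | MyLisp.py | tokenize
-- ===== SOURCE A (Python) =====
-- def tokenize(chars: str) -> list:
--     "Преобразует строку в список токенов, игнорируя комментарии Lisp."
--     tokens = []
--     while chars:
--         if chars[0] == ';':  # Если строка начинается с ';', игнорируем ее как комментарий
--             end_index = chars.find('\n')
--             if end_index == -1:
--                 break  # Если до конца строки нет символа перевода строки, выходим
--             chars = chars[end_index + 1:]  # Продолжаем с конца комментария
--         elif chars[0] in '()':
--             tokens.append(chars[0])
--             chars = chars[1:]
--         elif chars[0].isspace():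
--             chars = chars[1:]
--         else:
--             match = ''
--             while chars and not chars[0].isspace() and chars[0] not in '();':
--                 match += chars[0]
--                 chars = chars[1:]
--             tokens.append(match)
--     return tokens
-- ===== SOURCE B (Python) =====
-- def tokenize(chars: str) -> list:
--     "Преобразует строку в список токенов, игнорируя комментарии Lisp."
--     # Norvig-style: strip comments line-wise, pad parens, then one whitespace split.
--     code = ' '.join(line.split(';')[0] for line in chars.split('\n'))
--     padded = ''.join(' ' + c + ' ' if c in '()' else c for c in code)
--     return padded.split()
-- ===== Notes on version B (the rewrite author's own statement) =====
-- stated objective: faster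
-- what changed: Replaces the char-by-char state machine that repeatedly reslices the string with the standard Norvig-style tokenizer: strip comments per line (joined by a space), pad parentheses with spaces in one pass, and let str.split() produce the tokens.
import Mathlib
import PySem

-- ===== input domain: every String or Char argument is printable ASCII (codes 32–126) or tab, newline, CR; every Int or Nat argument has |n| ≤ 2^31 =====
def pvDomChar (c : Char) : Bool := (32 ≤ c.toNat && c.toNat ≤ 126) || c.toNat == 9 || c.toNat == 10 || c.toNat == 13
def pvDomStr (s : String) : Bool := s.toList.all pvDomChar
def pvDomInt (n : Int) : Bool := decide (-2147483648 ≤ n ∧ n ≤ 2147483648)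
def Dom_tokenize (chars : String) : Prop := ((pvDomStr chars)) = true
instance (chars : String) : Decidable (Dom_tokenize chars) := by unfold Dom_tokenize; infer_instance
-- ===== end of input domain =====

-- B replaces A's char-by-char state machine (repeated reslicing) with the idiomatic
-- Norvig-style pipeline: strip comments line-wise, pad parens, one whitespace split.

-- ===== PORT A =====
-- inner `while` of A: collects one token char by char, returns (match, remaining chars)
def pyGrab : List Char → List Char × List Char
  | [] => ([], [])
  | c :: rest =>
    if ¬ PySem.Chars.isspace c = true ∧ c ≠ '(' ∧ c ≠ ')' ∧ c ≠ ';' then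
      let p := pyGrab rest
      (c :: p.1, p.2)
    else ([], c :: rest)

-- termination helper for the outer loop (cited in decreasing_by)
theorem pyGrab_snd_le (s : List Char) : (pyGrab s).2.length ≤ s.length := by
  induction s with
  | nil => simp [pyGrab]
  | cons c r ih =>
    simp only [pyGrab]
    split_ifs with h
    · simp; omega
    · simp

-- outer `while chars:` loop of A; the emitted tokens are the returned list
def tokGo : List Char → List (List Char)
  | [] => []
  | c :: rest =>
    if c = ';' then
      let e := PySem.Chars.find (c :: rest) ['\n']   -- chars.find('\n')
      if e = -1 then []                               -- break
      else tokGo ((c :: rest).drop (e.toNat + 1))     -- chars = chars[end_index+1:]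
    else if c = '(' ∨ c = ')' then
      [c] :: tokGo rest
    else if PySem.Chars.isspace c = true then
      tokGo rest
    else
      let p := pyGrab (c :: rest)
      p.1 :: tokGo p.2
termination_by s => s.length
decreasing_by
  · simp only [List.length_drop, List.length_cons]; omega
  · simp
  · simp
  · have h1 := pyGrab_snd_le rest
    simp only [pyGrab]
    split_ifs with h
    · simp; omega
    · exact (h (by simp_all)).elim

def tokenize (chars : String) : List String :=
  (tokGo chars.toList).map String.ofList

-- ===== PORT B =====
def tokenize_alt (chars : String) : List String :=
  -- ' '.join(line.split(';')[0] for line in chars.split('\n'));  [0] of a split = its first piece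
  let code := PySem.Chars.join [' ']
      ((PySem.Chars.splitOn chars.toList ['\n']).map (fun line => (PySem.Chars.splitOn line [';']).headI))
  -- ''.join(' ' + c + ' ' if c in '()' else c for c in code)
  let padded := code.flatMap (fun c => if c = '(' ∨ c = ')' then [' ', c, ' '] else [c])
  -- padded.split()
  (PySem.Chars.split₀ padded).map String.ofList

-- ===== PRECONDITION & SPEC =====
def Spec_tokenize (chars : String) (out : List String) : Prop := out = tokenize_alt chars
instance (chars : String) (out : List String) : Decidable (Spec_tokenize chars out) := by unfold Spec_tokenize; infer_instance

-- ===== CLAIM (what is proved, stated in full; the proofs are below) =====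
def Claim_equal_tokenize : Prop := ∀ (chars : String), Dom_tokenize chars → Spec_tokenize chars (tokenize chars)

-- ===== LEMMAS AND PROOFS =====

-- accumulator form of splitting on a single separator character
def linesAuxBy (c : Char) : List Char → List Char → List (List Char)
  | [], cur => [cur.reverse]
  | d :: r, cur => if d = c then cur.reverse :: linesAuxBy c r [] else linesAuxBy c r (d :: cur)

-- accumulator form of whitespace splitting
def wordsAux : List Char → List Char → List (List Char)
  | [], cur => if cur.isEmpty then [] else [cur.reverse]
  | d :: r, cur =>
    if PySem.Chars.isspace d then
      (if cur.isEmpty then wordsAux r [] else cur.reverse :: wordsAux r [])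
    else wordsAux r (d :: cur)

def pad (c : Char) : List Char := if c = '(' ∨ c = ')' then [' ', c, ' '] else [c]

-- comment-stripping phase of B
def SCm (s : List Char) : List Char :=
  PySem.Chars.join [' '] ((linesAuxBy '\n' s []).map (fun l => l.takeWhile (· ≠ ';')))

theorem splitOn_go_eq (c : Char) (fuel : Nat) :
    ∀ (s cur : List Char) (acc : List (List Char)), s.length < fuel →
      PySem.Chars.splitOn.go [c] fuel s cur acc = acc.reverse ++ linesAuxBy c s cur := by
  induction fuel with
  | zero => intro s cur acc h; omega
  | succ n ih =>
    intro s cur acc h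
    match s with
    | [] => simp [PySem.Chars.splitOn.go, linesAuxBy]
    | d :: r =>
      by_cases hdc : d = c
      · subst hdc
        simp only [PySem.Chars.splitOn.go]
        rw [if_pos (by simp [List.isPrefixOf])]
        simp only [List.length_cons, List.drop_succ_cons, List.drop_zero,
          List.length_nil]
        rw [ih r [] (cur.reverse :: acc) (by simp at h; omega)]
        simp [linesAuxBy]
      · simp only [PySem.Chars.splitOn.go]
        rw [if_neg (by simp [List.isPrefixOf]; exact fun h' => hdc h'.symm)]
        rw [ih r (d :: cur) acc (by simp at h; omega)]
        simp [linesAuxBy, hdc]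

theorem splitOn_eq (c : Char) (s : List Char) :
    PySem.Chars.splitOn s [c] = linesAuxBy c s [] := by
  have := splitOn_go_eq c (s.length + 1) s [] [] (by omega)
  simpa [PySem.Chars.splitOn] using this

theorem split₀_go_eq : ∀ (s cur : List Char) (acc : List (List Char)),
    PySem.Chars.split₀.go s cur acc = acc.reverse ++ wordsAux s cur := by
  intro s
  induction s with
  | nil =>
    intro cur acc
    by_cases hc : cur.isEmpty <;> simp [PySem.Chars.split₀.go, wordsAux, hc]
  | cons d r ih =>
    intro cur acc
    by_cases hd : PySem.Chars.isspace d
    · by_cases hc : cur.isEmpty <;>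
        simp [PySem.Chars.split₀.go, wordsAux, hd, hc, ih]
    · simp [PySem.Chars.split₀.go, wordsAux, hd, ih]

theorem split₀_eq (s : List Char) : PySem.Chars.split₀ s = wordsAux s [] := by
  simpa [PySem.Chars.split₀] using split₀_go_eq s [] []

-- closed form of linesAuxBy
theorem linesAuxBy_closed (c : Char) : ∀ (s cur : List Char),
    linesAuxBy c s cur = (cur.reverse ++ s.takeWhile (· ≠ c)) ::
      (match s.dropWhile (· ≠ c) with | [] => [] | _ :: rest => linesAuxBy c rest []) := by
  intro s
  induction s with
  | nil => intro cur; simp [linesAuxBy]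
  | cons d r ih =>
    intro cur
    by_cases hdc : d = c
    · subst hdc
      simp [linesAuxBy]
    · simp only [linesAuxBy, if_neg hdc, ih (d :: cur),
        List.takeWhile_cons, List.dropWhile_cons]
      simp [hdc]

theorem join_sp_cons (a : List Char) (l : List (List Char)) (h : l ≠ []) :
    PySem.Chars.join [' '] (a :: l) = a ++ ' ' :: PySem.Chars.join [' '] l := by
  match l with
  | [] => exact absurd rfl h
  | b :: l' => simp [PySem.Chars.join, List.intercalate]

theorem join_sp_single (a : List Char) : PySem.Chars.join [' '] [a] = a := by
  simp [PySem.Chars.join, List.intercalate]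

theorem SC_closed (s : List Char) :
    SCm s = (s.takeWhile (· ≠ '\n')).takeWhile (· ≠ ';') ++
      (match s.dropWhile (· ≠ '\n') with | [] => [] | _ :: rest => ' ' :: SCm rest) := by
  rw [SCm, linesAuxBy_closed '\n' s []]
  cases hT : s.dropWhile (· ≠ '\n') with
  | nil => simp only [List.reverse_nil, List.nil_append, List.map_cons, List.map_nil]
           rw [join_sp_single]; simp
  | cons a as =>
    simp only [List.reverse_nil, List.nil_append, List.map_cons]
    rw [join_sp_cons]
    · rfl
    · rw [linesAuxBy_closed '\n' as []]; simp

theorem SC_nil : SCm [] = [] := by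
  rw [SC_closed]; simp

theorem SC_nl (r : List Char) : SCm ('\n' :: r) = ' ' :: SCm r := by
  rw [SC_closed]
  simp

theorem SC_other {d : Char} (h1 : d ≠ '\n') (h2 : d ≠ ';') (r : List Char) :
    SCm (d :: r) = d :: SCm r := by
  rw [SC_closed, SC_closed r]
  simp [h1, h2]

theorem SC_semi (r : List Char) :
    SCm (';' :: r) = (match r.dropWhile (· ≠ '\n') with
      | [] => [] | _ :: rest => ' ' :: SCm rest) := by
  rw [SC_closed]
  simp


-- Bool form of the token-character condition of A's inner loop
def Pb (x : Char) : Bool :=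
  decide (¬ PySem.Chars.isspace x = true ∧ x ≠ '(' ∧ x ≠ ')' ∧ x ≠ ';')

theorem pyGrab_eq (s : List Char) : pyGrab s = (s.takeWhile Pb, s.dropWhile Pb) := by
  induction s with
  | nil => simp [pyGrab]
  | cons c r ih =>
    by_cases h : ¬ PySem.Chars.isspace c = true ∧ c ≠ '(' ∧ c ≠ ')' ∧ c ≠ ';'
    · simp [pyGrab, h, ih, Pb]
    · have hPb : Pb c = false := by simp only [Pb]; exact decide_eq_false h
      simp only [pyGrab]
      rw [if_neg h]
      simp [hPb]

-- general fact not found in Mathlib under a citable name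
theorem dropWhile_eq_drop (p : Char → Bool) :
    ∀ l : List Char, l.dropWhile p = l.drop (l.takeWhile p).length := by
  intro l
  induction l with
  | nil => rfl
  | cons a t ih =>
    by_cases h : p a <;> simp [h, ih]

-- head of a non-empty dropWhile fails the predicate (head?-free form of head_dropWhile_not)
theorem dropWhile_head_false (p : Char → Bool) (s : List Char) {a : Char} {as : List Char}
    (h : s.dropWhile p = a :: as) : p a = false := by
  induction s with
  | nil => simp at h
  | cons b bs ih =>
    rw [List.dropWhile_cons] at h
    by_cases hp : p b
    · rw [if_pos hp] at h; exact ih h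
    · rw [if_neg hp] at h; cases h; simpa using hp

theorem prefix_getElem? {xs ys : List Char} (h : xs <+: ys) {i : Nat} (hi : i < xs.length) :
    xs[i]? = ys[i]? := by
  obtain ⟨t, rfl⟩ := h
  rw [List.getElem?_append_left hi]

-- `find` for a single-character needle, as a takeWhile length
theorem find_single (c : Char) (s : List Char) :
    PySem.Chars.find s [c] =
      if c ∈ s then (((s.takeWhile (· ≠ c)).length : Nat) : Int) else -1 := by
  by_cases hc : c ∈ s
  · rw [if_pos hc]
    have hinf : [c] <:+: s := (List.singleton_infix_iff c s).2 hc
    have h0 : 0 ≤ PySem.Chars.find s [c] := (PySem.Chars.find_nonneg_iff s [c]).2 hinf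
    obtain ⟨hpre, hmin⟩ := PySem.Chars.find_spec h0
    have hkle : (s.takeWhile (· ≠ c)).length ≤ s.length :=
      (List.takeWhile_prefix _).length_le
    have hne : s.dropWhile (· ≠ c) ≠ [] := fun hnil => by
      rw [List.dropWhile_eq_nil_iff] at hnil
      simpa using hnil c hc
    have hpk : [c] <+: s.drop (s.takeWhile (· ≠ c)).length := by
      rw [← dropWhile_eq_drop]
      obtain ⟨a, as, hT⟩ := List.exists_cons_of_ne_nil hne
      have hhd := dropWhile_head_false _ _ hT
      simp only [decide_eq_false_iff_not, not_not] at hhd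
      rw [hT]
      exact ⟨as, by simp [hhd]⟩
    have h1 : (PySem.Chars.find s [c]).toNat ≤ (s.takeWhile (· ≠ c)).length := by
      by_contra hlt
      push Not at hlt
      exact hmin _ hlt hpk
    have h2 : (s.takeWhile (· ≠ c)).length ≤ (PySem.Chars.find s [c]).toNat := by
      by_contra hlt
      push Not at hlt
      obtain ⟨ts, hts⟩ := hpre
      have h5 : s[(PySem.Chars.find s [c]).toNat]? = some c := by
        rw [show (PySem.Chars.find s [c]).toNat = (PySem.Chars.find s [c]).toNat + 0 by omega,
          ← List.getElem?_drop, ← hts]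
        rfl
      have h6 : (s.takeWhile (· ≠ c))[(PySem.Chars.find s [c]).toNat]? = some c :=
        (prefix_getElem? (List.takeWhile_prefix _) hlt).trans h5
      have := List.mem_takeWhile_imp (List.mem_of_getElem? h6)
      simp at this
    have hn : PySem.Chars.find s [c] = ((PySem.Chars.find s [c]).toNat : Int) :=
      (Int.toNat_of_nonneg h0).symm
    rw [hn]
    exact congrArg _ (by omega)
  · rw [if_neg hc]
    exact (PySem.Chars.find_eq_neg_one_iff s [c]).2
      (fun hinf => hc ((List.singleton_infix_iff c s).1 hinf))

theorem wordsAux_append (m : List Char) : ∀ (t cur : List Char),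
    (∀ x ∈ m, PySem.Chars.isspace x = false) →
    wordsAux (m ++ t) cur = wordsAux t (m.reverse ++ cur) := by
  induction m with
  | nil => intro t cur _; simp
  | cons x m' ih =>
    intro t cur h
    have hx : PySem.Chars.isspace x = false := h x (by simp)
    simp only [List.cons_append, wordsAux, hx, Bool.false_eq_true, if_false]
    rw [ih t (x :: cur) (fun y hy => h y (by simp [hy]))]
    simp

theorem flatMap_pad_plain (m : List Char) (h : ∀ x ∈ m, x ≠ '(' ∧ x ≠ ')') :
    m.flatMap pad = m := by
  induction m with
  | nil => rfl
  | cons x m' ih =>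
    have hx := h x (by simp)
    simp [pad, hx.1, hx.2, ih (fun y hy => h y (by simp [hy]))]

theorem SC_app (m : List Char) : ∀ t, (∀ x ∈ m, x ≠ '\n' ∧ x ≠ ';') →
    SCm (m ++ t) = m ++ SCm t := by
  induction m with
  | nil => intro t _; simp
  | cons d m' ih =>
    intro t h
    have hd := h d (by simp)
    rw [List.cons_append, SC_other hd.1 hd.2, ih t (fun y hy => h y (by simp [hy]))]
    rfl

theorem bridge (t : List Char)
    (h : t = [] ∨ ∃ d r, t = d :: r ∧
      (PySem.Chars.isspace d = true ∨ d = '(' ∨ d = ')' ∨ d = ';'))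
    (cur : List Char) (hc : cur ≠ []) :
    wordsAux ((SCm t).flatMap pad) cur = cur.reverse :: wordsAux ((SCm t).flatMap pad) [] := by
  have hcur : cur.isEmpty = false := by simpa using hc
  rcases h with rfl | ⟨d, r, rfl, hd⟩
  · simp [SC_nil, wordsAux, hcur]
  rcases hd with hsp | rfl | rfl | rfl
  · by_cases hnl : d = '\n'
    · subst hnl
      rw [SC_nl]
      simp [wordsAux, hcur, (by decide : pad ' ' = [' ']),
        (by decide : PySem.Chars.isspace ' ' = true)]
    · have hsemi : d ≠ ';' := by rintro rfl; exact absurd hsp (by decide)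
      have hp1 : d ≠ '(' := by rintro rfl; exact absurd hsp (by decide)
      have hp2 : d ≠ ')' := by rintro rfl; exact absurd hsp (by decide)
      rw [SC_other hnl hsemi]
      simp [wordsAux, hcur, pad, hp1, hp2, hsp]
  · rw [SC_other (by decide) (by decide)]
    simp [wordsAux, hcur, (by decide : pad '(' = [' ', '(', ' ']),
      (by decide : PySem.Chars.isspace ' ' = true),
      (by decide : PySem.Chars.isspace '(' = false)]
  · rw [SC_other (by decide) (by decide)]
    simp [wordsAux, hcur, (by decide : pad ')' = [' ', ')', ' ']),
      (by decide : PySem.Chars.isspace ' ' = true),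
      (by decide : PySem.Chars.isspace ')' = false)]
  · rw [SC_semi]
    cases hT : r.dropWhile (· ≠ '\n') with
    | nil => simp [wordsAux, hcur]
    | cons a as =>
      simp [wordsAux, hcur, (by decide : pad ' ' = [' ']),
        (by decide : PySem.Chars.isspace ' ' = true)]

theorem main_eq : ∀ (n : Nat) (s : List Char), s.length ≤ n →
    tokGo s = wordsAux ((SCm s).flatMap pad) [] := by
  intro n
  induction n with
  | zero =>
    intro s hs
    have h0 : s = [] := by cases s <;> simp_all
    subst h0
    simp [tokGo, SC_nil, wordsAux]
  | succ n ih =>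
    intro s hs
    match s with
    | [] => simp [tokGo, SC_nil, wordsAux]
    | c :: rest =>
      by_cases h1 : c = ';'
      · subst h1
        conv_lhs => rw [tokGo.eq_def]
        dsimp only
        rw [find_single]
        by_cases hm : '\n' ∈ rest
        · rw [if_pos (List.mem_cons_of_mem _ hm)]
          have htw : List.takeWhile (· ≠ '\n') (';' :: rest) =
              ';' :: List.takeWhile (· ≠ '\n') rest := by
            simp
          rw [htw]
          have hcond : ¬ (((';' :: List.takeWhile (· ≠ '\n') rest).length : Int) = -1) := by
            omega
          rw [if_neg hcond]
          have hdwne : rest.dropWhile (· ≠ '\n') ≠ [] := fun hnil => by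
            rw [List.dropWhile_eq_nil_iff] at hnil
            simpa using hnil '\n' hm
          obtain ⟨a, as, hT⟩ := List.exists_cons_of_ne_nil hdwne
          have hdrop : rest.drop ((List.takeWhile (· ≠ '\n') rest).length + 1) = as := by
            rw [← List.tail_drop, ← dropWhile_eq_drop, hT, List.tail_cons]
          have hlen : as.length + 1 ≤ rest.length := by
            have h5 := List.length_dropWhile_le (fun x => decide (x ≠ '\n')) rest
            rw [hT] at h5
            simpa using h5
          simp only [List.length_cons, Int.toNat_natCast, List.drop_succ_cons, hdrop]
          rw [SC_semi, hT]
          dsimp only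
          rw [ih as (by simp at hs; omega)]
          simp [wordsAux, (by decide : pad ' ' = [' ']),
            (by decide : PySem.Chars.isspace ' ' = true)]
        · have hnm : ¬ '\n' ∈ (';' :: rest) := by simp [hm]
          rw [if_neg hnm]
          rw [if_pos rfl]
          have hdw : rest.dropWhile (· ≠ '\n') = [] := by
            rw [List.dropWhile_eq_nil_iff]
            intro x hx
            simp only [decide_eq_true_eq]
            rintro rfl
            exact hm hx
          rw [SC_semi, hdw]
          simp [wordsAux]
      · by_cases h2 : c = '(' ∨ c = ')'
        · conv_lhs => rw [tokGo.eq_def]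
          dsimp only
          rw [if_neg h1, if_pos h2]
          have hc1 : c ≠ '\n' := by rcases h2 with rfl | rfl <;> decide
          have hsp : PySem.Chars.isspace c = false := by rcases h2 with rfl | rfl <;> decide
          have hpad : pad c = [' ', c, ' '] := by simp [pad, h2]
          rw [SC_other hc1 h1, ih rest (by simp at hs; omega)]
          simp [hpad, wordsAux, hsp, (by decide : PySem.Chars.isspace ' ' = true)]
        · by_cases h3 : PySem.Chars.isspace c = true
          · conv_lhs => rw [tokGo.eq_def]
            dsimp only
            rw [if_neg h1, if_neg h2, if_pos h3]
            by_cases hnl : c = '\n'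
            · subst hnl
              rw [SC_nl, ih rest (by simp at hs; omega)]
              simp [wordsAux, (by decide : pad ' ' = [' ']),
                (by decide : PySem.Chars.isspace ' ' = true)]
            · have hp1 : c ≠ '(' := fun hh => h2 (Or.inl hh)
              have hp2 : c ≠ ')' := fun hh => h2 (Or.inr hh)
              rw [SC_other hnl h1, ih rest (by simp at hs; omega)]
              simp [pad, hp1, hp2, wordsAux, h3]
          · conv_lhs => rw [tokGo.eq_def]
            dsimp only
            rw [if_neg h1, if_neg h2, if_neg h3, pyGrab_eq]
            dsimp only
            push Not at h2
            have hPc : Pb c = true := by simp [Pb, h1, h2.1, h2.2, h3]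
            have hmemP : ∀ x ∈ (c :: rest).takeWhile Pb,
                PySem.Chars.isspace x = false ∧ x ≠ '(' ∧ x ≠ ')' ∧ x ≠ ';' := by
              intro x hx
              have hx2 := List.mem_takeWhile_imp hx
              simp only [Pb, decide_eq_true_eq] at hx2
              exact ⟨by simpa using hx2.1, hx2.2.1, hx2.2.2.1, hx2.2.2.2⟩
            have hmem2 : ∀ x ∈ (c :: rest).takeWhile Pb, x ≠ '\n' ∧ x ≠ ';' := by
              intro x hx
              obtain ⟨hsp', _, _, hsemi⟩ := hmemP x hx
              exact ⟨by rintro rfl; exact absurd hsp' (by decide), hsemi⟩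
            conv_rhs => rw [← List.takeWhile_append_dropWhile (p := Pb) (l := c :: rest)]
            rw [SC_app _ _ hmem2, List.flatMap_append,
              flatMap_pad_plain _ (fun x hx => ⟨(hmemP x hx).2.1, (hmemP x hx).2.2.1⟩),
              wordsAux_append _ _ _ (fun x hx => (hmemP x hx).1)]
            rw [List.append_nil]
            have hmne : (c :: rest).takeWhile Pb ≠ [] := by
              simp [hPc]
            have hside : (c :: rest).dropWhile Pb = [] ∨ ∃ d r',
                (c :: rest).dropWhile Pb = d :: r' ∧
                (PySem.Chars.isspace d = true ∨ d = '(' ∨ d = ')' ∨ d = ';') := by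
              cases hT : (c :: rest).dropWhile Pb with
              | nil => exact Or.inl rfl
              | cons d r' =>
                refine Or.inr ⟨d, r', rfl, ?_⟩
                have hdf := dropWhile_head_false _ _ hT
                simp only [Pb, decide_eq_false_iff_not] at hdf
                by_cases hd1 : PySem.Chars.isspace d = true
                · exact Or.inl hd1
                · by_cases hd2 : d = '('
                  · exact Or.inr (Or.inl hd2)
                  · by_cases hd3 : d = ')'
                    · exact Or.inr (Or.inr (Or.inl hd3))
                    · exact Or.inr (Or.inr (Or.inr (by tauto)))
            rw [bridge _ hside _ (by simpa using hmne), List.reverse_reverse]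
            have hdwcons : (c :: rest).dropWhile Pb = rest.dropWhile Pb := by
              simp [hPc]
            congr 1
            rw [hdwcons]
            exact ih _ (by
              have h6 := List.length_dropWhile_le Pb rest
              simp at hs
              omega)

theorem main (s : List Char) : tokGo s = wordsAux ((SCm s).flatMap pad) [] :=
  main_eq s.length s le_rfl

-- ===== VERDICT (by name: the statement is the Claim_ definition above) =====
theorem tokenize_spec : Claim_equal_tokenize := by
  intro chars _
  unfold Spec_tokenize tokenize tokenize_alt
  simp only [splitOn_eq]
  have hhead : ∀ line : List Char,
      (linesAuxBy ';' line []).headI = line.takeWhile (· ≠ ';') := by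
    intro line; rw [linesAuxBy_closed]; simp
  simp only [hhead, split₀_eq,
    show (fun c => if c = '(' ∨ c = ')' then [' ', c, ' '] else [c]) = pad from rfl]
  exact congrArg (List.map String.ofList) (main chars.toList)
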